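-- pv_equiv track=rewrite | github.com/dcorbe/ircd-phatbox | tools/gen_unicode_tables.py | build_script_ranges
-- ===== SOURCE A (Python) =====
-- from collections import defaultdict
--
-- def build_script_ranges(scripts_dict):
--     """Build per-script range lists, return (script_names, ranges_by_script)."""
--     # Collect all script names, assign IDs (Common=0, Inherited=1, rest alphabetical)
--     all_scripts = sorted(set(scripts_dict.values()))
--     script_ids = {}
--     script_ids["Common"] = 0
--     script_ids["Inherited"] = 1
--     idx = 2
--     for s in all_scripts:
--         if s not in script_ids:
--             script_ids[s] = idx
--             idx += 1
--
--     # Build ranges per script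
--     by_script = defaultdict(list)
--     for cp, script in sorted(scripts_dict.items()):
--         by_script[script].append(cp)
--
--     # Compress into ranges
--     ranges_by_id = {}
--     for script, cps in by_script.items():
--         sid = script_ids[script]
--         cps = sorted(cps)
--         ranges = []
--         start = end = cps[0]
--         for cp in cps[1:]:
--             if cp == end + 1:
--                 end = cp
--             else:
--                 ranges.append((start, end))
--                 start = end = cp
--         ranges.append((start, end))
--         ranges_by_id[sid] = ranges
--
--     # Build a single flat table: (start, end, script_id)
--     flat = []
--     for sid, ranges in ranges_by_id.items():
--         for s, e in ranges:
--             flat.append((s, e, sid))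
--     flat.sort()
--
--     return script_ids, flat
-- ===== SOURCE B (Python) =====
-- def build_script_ranges(scripts_dict):
--     """Build per-script range lists, return (script_names, ranges_by_script)."""
--     # Collect all script names, assign IDs (Common=0, Inherited=1, rest alphabetical)
--     all_scripts = sorted(set(scripts_dict.values()))
--     script_ids = {}
--     script_ids["Common"] = 0
--     script_ids["Inherited"] = 1
--     idx = 2
--     for s in all_scripts:
--         if s not in script_ids:
--             script_ids[s] = idx
--             idx += 1
--
--     # One sorted pass: emit maximal runs of consecutive codepoints with the
--     # same script, already ordered by start.
--     runs = []
--     run = None  # (start, end, script)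
--     for cp, script in sorted(scripts_dict.items()):
--         if run is not None and cp == run[1] + 1 and script == run[2]:
--             run = (run[0], cp, script)
--         else:
--             if run is not None:
--                 runs.append(run)
--             run = (cp, cp, script)
--     if run is not None:
--         runs.append(run)
--
--     flat = [(s, e, script_ids[scr]) for s, e, scr in runs]
--     return script_ids, flat
-- ===== Notes on version B (the rewrite author's own statement) =====
-- stated objective: simpler
-- what changed: B keeps A's script-id assignment but replaces A's group-by-script defaultdict, per-script compression loop, flat-table rebuild and final sort by a single pass over sorted(scripts_dict.items()) that emits maximal (start, end, script) runs already ordered by start.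
import Mathlib
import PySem

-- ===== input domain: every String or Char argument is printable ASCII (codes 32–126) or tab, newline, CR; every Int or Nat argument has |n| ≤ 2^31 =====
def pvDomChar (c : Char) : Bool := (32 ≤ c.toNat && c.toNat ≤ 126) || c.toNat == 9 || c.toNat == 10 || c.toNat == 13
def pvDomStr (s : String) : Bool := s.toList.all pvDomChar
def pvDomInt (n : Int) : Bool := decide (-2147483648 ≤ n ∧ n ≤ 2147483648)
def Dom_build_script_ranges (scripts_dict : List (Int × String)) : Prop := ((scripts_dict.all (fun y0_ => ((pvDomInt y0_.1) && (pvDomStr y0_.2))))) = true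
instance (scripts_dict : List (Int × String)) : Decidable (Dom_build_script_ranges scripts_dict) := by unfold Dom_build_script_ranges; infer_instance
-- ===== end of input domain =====

-- B replaces A's group-by-script dict, per-script compression and final sort by ONE pass
-- over the sorted items that emits the maximal runs already ordered by start (objective:
-- simpler — same asymptotic cost, the sort dominates both).

-- ===== PORT A =====
-- the script-id assignment block, textually identical in A and B, shared by both ports
def pvScriptIds (vals : List String) : PySem.Dict String Int :=
  let all_scripts := PySem.List.sorted (PySem.Set.ofList vals) (fun s => s)
  let d0 := (PySem.Dict.empty.insert "Common" (0 : Int)).insert "Inherited" 1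
  (List.foldl (fun (st : PySem.Dict String Int × Int) s =>
      if st.1.contains s then st else (st.1.insert s st.2, st.2 + 1)) (d0, 2) all_scripts).1

-- A's inner compression loop: 'for cp in cps[1:]' carrying (start, end)
def pvCompress (st en : Int) : List Int → List (Int × Int)
  | [] => [(st, en)]
  | c :: t => if c = en + 1 then pvCompress st c t else (st, en) :: pvCompress c c t

def build_script_ranges (scripts_dict : List (Int × String)) : (List (String × Int)) × (List (Int × Int × Int)) :=
  let d := PySem.Dict.ofList scripts_dict
  let script_ids := pvScriptIds d.values
  -- sorted(scripts_dict.items()): sorting the pairs by the codepoint component is exact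
  -- because dict keys are unique, so the tuple comparison never looks at the script
  let its := PySem.List.sorted d.items (fun p => p.1)
  let by_script := List.foldl
      (fun bs (p : Int × String) => bs.modify p.2 [] (fun l => l ++ [p.1])) PySem.Dict.empty its
  let ranges_by_id := List.foldl (fun rd (p : String × List Int) =>
      let sid := script_ids.getD p.1 0
      let cps := PySem.List.sorted p.2 (fun c => c)
      match cps with
      | [] => rd            -- unreachable: every group holds at least one codepoint (Python's cps[0])
      | c :: t => rd.insert sid (pvCompress c c t)) PySem.Dict.empty by_script.items
  let flat := List.foldl (fun f (p : Int × List (Int × Int)) =>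
      f ++ p.2.map (fun r => (r.1, r.2, p.1))) ([] : List (Int × Int × Int)) ranges_by_id.items
  -- flat.sort(): sorting by the start component is exact because all starts are distinct
  (script_ids.items, PySem.List.sorted flat (fun t => t.1))

-- ===== PORT B =====
-- B's single loop over the sorted items, state = the current run (start, end, script)
def pvRunsGo (st en : Int) (sc : String) : List (Int × String) → List (Int × Int × String)
  | [] => [(st, en, sc)]
  | (c, s) :: t =>
      if c = en + 1 ∧ s = sc then pvRunsGo st c sc t
      else (st, en, sc) :: pvRunsGo c c s t

def pvRuns : List (Int × String) → List (Int × Int × String)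
  | [] => []
  | (c, s) :: t => pvRunsGo c c s t

def build_script_ranges_alt (scripts_dict : List (Int × String)) : (List (String × Int)) × (List (Int × Int × Int)) :=
  let d := PySem.Dict.ofList scripts_dict
  let script_ids := pvScriptIds d.values
  let its := PySem.List.sorted d.items (fun p => p.1)
  (script_ids.items, (pvRuns its).map (fun r => (r.1, r.2.1, script_ids.getD r.2.2 0)))

-- ===== PRECONDITION & SPEC =====
def Spec_build_script_ranges (scripts_dict : List (Int × String)) (out : (List (String × Int)) × (List (Int × Int × Int))) : Prop := out = build_script_ranges_alt scripts_dict
instance (scripts_dict : List (Int × String)) (out : (List (String × Int)) × (List (Int × Int × Int))) : Decidable (Spec_build_script_ranges scripts_dict out) := by unfold Spec_build_script_ranges; infer_instance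

-- ===== CLAIM (what is proved, stated in full; the proofs are below) =====
def Claim_equal_build_script_ranges : Prop := ∀ (scripts_dict : List (Int × String)), Dom_build_script_ranges scripts_dict → Spec_build_script_ranges scripts_dict (build_script_ranges scripts_dict)

-- ===== LEMMAS AND PROOFS =====

-- the codepoints of script sc, in list order
def pvF (sc : String) (l : List (Int × String)) : List Int :=
  (l.filter (fun p => p.2 == sc)).map (fun p => p.1)

-- A's compression of a whole (nonempty) codepoint list
def pvAranges : List Int → List (Int × Int)
  | [] => []
  | c :: t => pvCompress c c t

-- the runs of script sc among B's runs
def pvG (sc : String) (rs : List (Int × Int × String)) : List (Int × Int × String) :=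
  rs.filter (fun r => r.2.2 == sc)

def pvMk (sc : String) (r : Int × Int) : Int × Int × String := (r.1, r.2, sc)

-- the step of the script-id fold, named for the lemmas below
def pvIdsStep (st : PySem.Dict String Int × Int) (s : String) : PySem.Dict String Int × Int :=
  if st.1.contains s then st else (st.1.insert s st.2, st.2 + 1)

def pvIdsInv (st : PySem.Dict String Int × Int) : Prop :=
  (∀ k v, st.1.get? k = some v → v < st.2) ∧
  (∀ k k' v v', k ≠ k' → st.1.get? k = some v → st.1.get? k' = some v' → v ≠ v')

lemma pvIds_fold (L : List String) (st : PySem.Dict String Int × Int) (h : pvIdsInv st) :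
    pvIdsInv (List.foldl pvIdsStep st L) ∧
    (∀ k, st.1.contains k = true → (List.foldl pvIdsStep st L).1.contains k = true) ∧
    (∀ s ∈ L, (List.foldl pvIdsStep st L).1.contains s = true) := by
  induction L generalizing st with
  | nil => exact ⟨h, fun k hk => hk, fun s hs => absurd hs (List.not_mem_nil)⟩
  | cons a L ih =>
    have hstep : pvIdsInv (pvIdsStep st a) ∧
        (∀ k, st.1.contains k = true → (pvIdsStep st a).1.contains k = true) ∧
        (pvIdsStep st a).1.contains a = true := by
      unfold pvIdsStep
      by_cases hc : st.1.contains a = true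
      · rw [if_pos hc]; exact ⟨h, fun k hk => hk, hc⟩
      · rw [if_neg hc]
        refine ⟨⟨?_, ?_⟩, ?_, ?_⟩
        · intro k v hk
          dsimp only at hk ⊢
          rw [PySem.Dict.get?_insert] at hk
          split_ifs at hk with he
          · cases hk; omega
          · have := h.1 k v hk; omega
        · intro k k' v v' hne hk hk'
          dsimp only at hk hk'
          rw [PySem.Dict.get?_insert] at hk hk'
          split_ifs at hk hk' with he he'
          · exact absurd (he.trans he'.symm) hne
          · cases hk; have := h.1 k' v' hk'; omega
          · cases hk'; have := h.1 k v hk; omega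
          · exact h.2 k k' v v' hne hk hk'
        · intro k hk
          dsimp only
          simp [PySem.Dict.contains_insert, hk]
        · dsimp only
          simp [PySem.Dict.contains_insert]
    have ih' := ih (pvIdsStep st a) hstep.1
    refine ⟨ih'.1, fun k hk => ih'.2.1 k (hstep.2.1 k hk), ?_⟩
    intro s hs
    rcases List.mem_cons.mp hs with rfl | hs
    · exact ih'.2.1 s hstep.2.2
    · exact ih'.2.2 s hs

-- distinct members of vals get distinct ids
lemma pvScriptIds_inj (vals : List String) {a b : String}
    (ha : a ∈ vals) (hb : b ∈ vals) (hne : a ≠ b) :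
    (pvScriptIds vals).getD a 0 ≠ (pvScriptIds vals).getD b 0 := by
  have hinv0 : pvIdsInv ((PySem.Dict.empty.insert "Common" (0 : Int)).insert "Inherited" 1, 2) := by
    constructor
    · intro k v hk
      rw [PySem.Dict.get?_insert] at hk; split_ifs at hk with h1
      · cases hk; omega
      · rw [PySem.Dict.get?_insert] at hk; split_ifs at hk with h2
        · cases hk; omega
        · rw [PySem.Dict.get?_empty] at hk; cases hk
    · intro k k' v v' hne hk hk'
      rw [PySem.Dict.get?_insert, PySem.Dict.get?_insert, PySem.Dict.get?_empty] at hk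
      rw [PySem.Dict.get?_insert, PySem.Dict.get?_insert, PySem.Dict.get?_empty] at hk'
      split_ifs at hk hk' <;> simp_all <;> omega
  have hfold := pvIds_fold (PySem.List.sorted (PySem.Set.ofList vals) (fun s => s)) _ hinv0
  have hmem : ∀ x ∈ vals, (pvScriptIds vals).contains x = true := by
    intro x hx
    have : x ∈ PySem.List.sorted (PySem.Set.ofList vals) (fun s => s) := by
      rw [PySem.List.mem_sorted]
      exact (PySem.Set.mem_ofList vals x).mpr hx
    exact hfold.2.2 x this
  have hca := hmem a ha
  have hcb := hmem b hb
  rw [PySem.Dict.contains_eq_isSome_get?] at hca hcb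
  rcases Option.isSome_iff_exists.mp hca with ⟨va, hva⟩
  rcases Option.isSome_iff_exists.mp hcb with ⟨vb, hvb⟩
  have hne' : va ≠ vb := hfold.1.2 a b va vb hne hva hvb
  rw [PySem.Dict.getD_of_get?_eq_some _ _ hva, PySem.Dict.getD_of_get?_eq_some _ _ hvb]
  exact hne'

-- cons-step simp lemmas for the four loop bodies
lemma pvF_cons_eq (sc : String) (c : Int) (u : List (Int × String)) :
    pvF sc ((c, sc) :: u) = c :: pvF sc u := by simp [pvF]

lemma pvF_cons_ne (sc s : String) (c : Int) (u : List (Int × String)) (h : s ≠ sc) :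
    pvF sc ((c, s) :: u) = pvF sc u := by simp [pvF, h]

lemma pvG_cons_eq (sc : String) (a b : Int) (rs : List (Int × Int × String)) :
    pvG sc ((a, b, sc) :: rs) = (a, b, sc) :: pvG sc rs := by simp [pvG]

lemma pvG_cons_ne (sc sc0 : String) (a b : Int) (rs : List (Int × Int × String)) (h : sc0 ≠ sc) :
    pvG sc ((a, b, sc0) :: rs) = pvG sc rs := by simp [pvG, h]

lemma pvRunsGo_cons_pos (st en c : Int) (sc : String) (u : List (Int × String)) (h : c = en + 1) :
    pvRunsGo st en sc ((c, sc) :: u) = pvRunsGo st c sc u := by simp [pvRunsGo, h]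

lemma pvRunsGo_cons_neg (st en c : Int) (sc0 s : String) (u : List (Int × String))
    (h : ¬(c = en + 1 ∧ s = sc0)) :
    pvRunsGo st en sc0 ((c, s) :: u) = (st, en, sc0) :: pvRunsGo c c s u := by
  simp only [pvRunsGo, if_neg h]

lemma pvCompress_pos (st en c : Int) (t : List Int) (h : c = en + 1) :
    pvCompress st en (c :: t) = pvCompress st c t := by simp [pvCompress, h]

lemma pvCompress_neg (st en c : Int) (t : List Int) (h : ¬ c = en + 1) :
    pvCompress st en (c :: t) = (st, en) :: pvCompress c c t := by
  simp only [pvCompress, if_neg h]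

-- the crux: the runs of one pass, restricted to one script, are A's per-script compression
lemma pvCrux_go (t : List (Int × String)) : ∀ (st en : Int) (sc0 : String),
    t.Pairwise (fun a b => a.1 < b.1) → (∀ x ∈ t, en < x.1) →
    (pvG sc0 (pvRunsGo st en sc0 t) = (pvCompress st en (pvF sc0 t)).map (pvMk sc0)) ∧
    (∀ sc, sc ≠ sc0 → pvG sc (pvRunsGo st en sc0 t) = (pvAranges (pvF sc t)).map (pvMk sc)) := by
  induction t with
  | nil =>
    intro st en sc0 _ _
    constructor
    · simp [pvRunsGo, pvG, pvF, pvCompress, pvMk]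
    · intro sc hsc
      have hsc' : sc0 ≠ sc := Ne.symm hsc
      simp [pvRunsGo, pvG, pvF, pvAranges, hsc']
  | cons p u ih =>
    obtain ⟨c, s⟩ := p
    intro st en sc0 hpw hen
    have hpwu : u.Pairwise (fun a b => a.1 < b.1) := hpw.tail
    have hcu : ∀ x ∈ u, c < x.1 := fun x hx => (List.pairwise_cons.mp hpw).1 x hx
    have henc : en < c := hen (c, s) List.mem_cons_self
    have hhead : ∀ (sc : String) (c' : Int) (t' : List Int), pvF sc u = c' :: t' → c < c' := by
      intro sc c' t' hF
      have : c' ∈ pvF sc u := by rw [hF]; exact List.mem_cons_self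
      simp only [pvF, List.mem_map, List.mem_filter] at this
      obtain ⟨x, ⟨hxu, _⟩, rfl⟩ := this
      exact hcu x hxu
    by_cases hcont : c = en + 1 ∧ s = sc0
    · obtain ⟨hc1, rfl⟩ := hcont
      have ih' := ih st c s hpwu (fun x hx => by have := hcu x hx; omega)
      rw [pvRunsGo_cons_pos st en c s u hc1]
      constructor
      · rw [ih'.1, pvF_cons_eq, pvCompress_pos st en c _ hc1]
      · intro sc hsc
        rw [ih'.2 sc hsc, pvF_cons_ne sc s c u (Ne.symm hsc)]
    · rw [pvRunsGo_cons_neg st en c sc0 s u hcont]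
      have ih' := ih c c s hpwu hcu
      constructor
      · rw [pvG_cons_eq]
        by_cases hs : s = sc0
        · subst hs
          have hc1 : ¬ c = en + 1 := fun h => hcont ⟨h, rfl⟩
          rw [ih'.1, pvF_cons_eq, pvCompress_neg st en c _ hc1]
          simp [pvMk]
        · rw [ih'.2 sc0 (fun h => hs h.symm), pvF_cons_ne sc0 s c u hs]
          cases hFu : pvF sc0 u with
          | nil => simp [pvAranges, pvCompress, pvMk]
          | cons c' t' =>
            have hc' : c < c' := hhead sc0 c' t' hFu
            rw [pvCompress_neg st en c' t' (by omega)]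
            simp [pvAranges, pvMk]
      · intro sc hsc
        rw [pvG_cons_ne sc sc0 st en _ (Ne.symm hsc)]
        by_cases hs2 : sc = s
        · subst hs2
          rw [ih'.1, pvF_cons_eq]
          rfl
        · rw [ih'.2 sc hs2, pvF_cons_ne sc s c u (Ne.symm hs2)]

lemma pvCrux (l : List (Int × String)) (hpw : l.Pairwise (fun a b => a.1 < b.1)) (sc : String) :
    pvG sc (pvRuns l) = (pvAranges (pvF sc l)).map (pvMk sc) := by
  cases l with
  | nil => simp [pvRuns, pvG, pvF, pvAranges]
  | cons p t =>
    obtain ⟨c, s⟩ := p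
    have hgo := pvCrux_go t c c s hpw.tail (fun x hx => (List.pairwise_cons.mp hpw).1 x hx)
    by_cases hs : sc = s
    · subst hs
      rw [show pvRuns ((c, sc) :: t) = pvRunsGo c c sc t from rfl, hgo.1, pvF_cons_eq]
      rfl
    · rw [show pvRuns ((c, s) :: t) = pvRunsGo c c s t from rfl, hgo.2 sc hs,
        pvF_cons_ne sc s c t (Ne.symm hs)]

-- B's runs have strictly increasing starts
lemma pvRunsGo_pw (t : List (Int × String)) : ∀ (st en : Int) (sc : String),
    st ≤ en → t.Pairwise (fun a b => a.1 < b.1) → (∀ x ∈ t, en < x.1) →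
    (pvRunsGo st en sc t).Pairwise (fun a b => a.1 < b.1) ∧
    (∀ r ∈ pvRunsGo st en sc t, st ≤ r.1) := by
  induction t with
  | nil => intro st en sc h _ _; simp [pvRunsGo]
  | cons p u ih =>
    obtain ⟨c, s⟩ := p
    intro st en sc hse hpw hen
    have henc : en < c := hen (c, s) List.mem_cons_self
    have hcu : ∀ x ∈ u, c < x.1 := fun x hx => (List.pairwise_cons.mp hpw).1 x hx
    by_cases hcont : c = en + 1 ∧ s = sc
    · obtain ⟨hc1, rfl⟩ := hcont
      rw [show pvRunsGo st en s ((c, s) :: u) = pvRunsGo st c s u by simp [pvRunsGo, hc1]]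
      exact ih st c s (by omega) hpw.tail hcu
    · rw [show pvRunsGo st en sc ((c, s) :: u) = (st, en, sc) :: pvRunsGo c c s u by
        simp [pvRunsGo, hcont]]
      have ih' := ih c c s (le_refl c) hpw.tail hcu
      constructor
      · rw [List.pairwise_cons]
        exact ⟨fun r hr => by have := ih'.2 r hr; omega, ih'.1⟩
      · intro r hr
        rcases List.mem_cons.mp hr with rfl | hr
        · exact le_refl st
        · have := ih'.2 r hr; omega

lemma pvRuns_pw (l : List (Int × String)) (hpw : l.Pairwise (fun a b => a.1 < b.1)) :
    (pvRuns l).Pairwise (fun a b => a.1 < b.1) := by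
  cases l with
  | nil => simp [pvRuns]
  | cons p t =>
    obtain ⟨c, s⟩ := p
    exact (pvRunsGo_pw t c c s (le_refl c) hpw.tail
      (fun x hx => (List.pairwise_cons.mp hpw).1 x hx)).1

-- every run's script occurs in the item list
lemma pvRunsGo_scripts (t : List (Int × String)) : ∀ (st en : Int) (sc : String),
    ∀ r ∈ pvRunsGo st en sc t, r.2.2 = sc ∨ ∃ x ∈ t, r.2.2 = x.2 := by
  induction t with
  | nil => intro st en sc r hr; simp [pvRunsGo] at hr; subst hr; left; rfl
  | cons p u ih =>
    obtain ⟨c, s⟩ := p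
    intro st en sc r hr
    simp only [pvRunsGo] at hr
    split_ifs at hr with hcont
    · rcases ih st c sc r hr with h | ⟨x, hx, h⟩
      · left; exact h
      · right; exact ⟨x, List.mem_cons_of_mem _ hx, h⟩
    · rcases List.mem_cons.mp hr with rfl | hr
      · left; rfl
      · rcases ih c c s r hr with h | ⟨x, hx, h⟩
        · right; exact ⟨(c, s), List.mem_cons_self, h⟩
        · right; exact ⟨x, List.mem_cons_of_mem _ hx, h⟩

lemma pvRuns_scripts (l : List (Int × String)) :
    ∀ r ∈ pvRuns l, ∃ x ∈ l, r.2.2 = x.2 := by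
  cases l with
  | nil => intro r hr; simp [pvRuns] at hr
  | cons p t =>
    obtain ⟨c, s⟩ := p
    intro r hr
    rcases pvRunsGo_scripts t c c s r hr with h | ⟨x, hx, h⟩
    · exact ⟨(c, s), List.mem_cons_self, h⟩
    · exact ⟨x, List.mem_cons_of_mem _ hx, h⟩

-- partitioning a list by the distinct values of a key is a permutation of it
lemma pvPerm_flatMap_filter {α β : Type} [DecidableEq β] [BEq β] [LawfulBEq β] (key : α → β) :
    ∀ (D : List β) (L : List α), D.Nodup → (∀ r ∈ L, key r ∈ D) →
    (D.flatMap (fun c => L.filter (fun r => key r == c))).Perm L := by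
  intro D
  induction D with
  | nil =>
    intro L _ hL
    cases L with
    | nil => simp
    | cons a L => exact absurd (hL a List.mem_cons_self) (List.not_mem_nil)
  | cons c D ih =>
    intro L hnd hL
    rw [List.flatMap_cons]
    have hrest : D.flatMap (fun c' => L.filter (fun r => key r == c')) =
        D.flatMap (fun c' => (L.filter (fun r => !(key r == c))).filter (fun r => key r == c')) := by
      apply List.flatMap_congr
      intro c' hc'
      have hcc' : c' ≠ c := Ne.symm ((List.pairwise_cons.mp hnd).1 c' hc')
      rw [List.filter_filter]
      apply List.filter_congr
      intro x _
      by_cases hx : key x = c'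
      · have hxc : ¬ key x = c := fun h => hcc' (by rw [← hx, h])
        simp [hx, hcc']
      · simp [hx]
    rw [hrest]
    have hL' : ∀ r ∈ L.filter (fun r => !(key r == c)), key r ∈ D := by
      intro r hr
      have hm := List.mem_filter.mp hr
      have := hL r hm.1
      rcases List.mem_cons.mp this with h | h
      · exact absurd h (by simpa using hm.2)
      · exact h
    have hperm := ih (L.filter (fun r => !(key r == c))) (List.Nodup.of_cons hnd) hL'
    exact (List.Perm.append_left _ hperm).trans (List.filter_append_perm _ L)

-- a dict with Nodup keys is its keys paired with their values
lemma pvItems_eq_keys_map {κ ν : Type} [BEq κ] [LawfulBEq κ] (d : PySem.Dict κ ν) (d0 : ν)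
    (h : d.keys.Nodup) : d.items = d.keys.map (fun k => (k, d.getD k d0)) := by
  have : d.keys.map (fun k => (k, d.getD k d0)) = d.items.map (fun p => (p.1, d.getD p.1 d0)) := by
    simp only [PySem.Dict.keys, List.map_map]; rfl
  rw [this]
  conv_lhs => rw [← List.map_id d.items]
  apply List.map_congr_left
  intro p hp
  have : d.getD p.1 d0 = p.2 :=
    PySem.Dict.getD_of_mem_items d (by exact (Prod.mk.eta ▸ hp)) h d0
  simp [this]

-- named stages of port A (definitionally equal to the let-bound locals of the ports)
def pvD (sd : List (Int × String)) : PySem.Dict Int String := PySem.Dict.ofList sd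

def pvIts (sd : List (Int × String)) : List (Int × String) :=
  PySem.List.sorted (pvD sd).items (fun p => p.1)

def pvIds (sd : List (Int × String)) : PySem.Dict String Int := pvScriptIds (pvD sd).values

def pvBy (sd : List (Int × String)) : PySem.Dict String (List Int) :=
  List.foldl (fun bs (p : Int × String) => bs.modify p.2 [] (fun l => l ++ [p.1]))
    PySem.Dict.empty (pvIts sd)

def pvRB (sd : List (Int × String)) : PySem.Dict Int (List (Int × Int)) :=
  List.foldl (fun rd (p : String × List Int) =>
      let sid := (pvIds sd).getD p.1 0
      let cps := PySem.List.sorted p.2 (fun c => c)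
      match cps with
      | [] => rd
      | c :: t => rd.insert sid (pvCompress c c t)) PySem.Dict.empty (pvBy sd).items

def pvFlat (sd : List (Int × String)) : List (Int × Int × Int) :=
  List.foldl (fun f (p : Int × List (Int × Int)) =>
      f ++ p.2.map (fun r => (r.1, r.2, p.1))) ([] : List (Int × Int × Int)) (pvRB sd).items

def pvSidMap (sd : List (Int × String)) (r : Int × Int × String) : Int × Int × Int :=
  (r.1, r.2.1, (pvIds sd).getD r.2.2 0)

lemma pvA_unfold (sd : List (Int × String)) :
    build_script_ranges sd = ((pvIds sd).items, PySem.List.sorted (pvFlat sd) (fun t => t.1)) := rfl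

lemma pvB_unfold (sd : List (Int × String)) :
    build_script_ranges_alt sd = ((pvIds sd).items, (pvRuns (pvIts sd)).map (pvSidMap sd)) := rfl

-- the sorted items are strictly increasing in the codepoint
lemma pvIts_pw (sd : List (Int × String)) :
    (pvIts sd).Pairwise (fun a b => a.1 < b.1) := by
  have hle : (pvIts sd).Pairwise (fun a b => a.1 ≤ b.1) :=
    PySem.List.sorted_pairwise (pvD sd).items (fun p => p.1)
  have hk : ((pvIts sd).map (fun p => p.1)).Nodup := by
    have hnd : ((pvD sd).items.map (fun p => p.1)).Nodup := PySem.Dict.nodup_keys_ofList sd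
    have hperm : ((pvIts sd).map (fun p => p.1)).Perm ((pvD sd).items.map (fun p => p.1)) :=
      (PySem.List.sorted_perm (pvD sd).items (fun p => p.1) false).map _
    exact hperm.nodup_iff.mpr hnd
  have hne : (pvIts sd).Pairwise (fun a b => a.1 ≠ b.1) := List.pairwise_map.mp hk
  exact (hle.and hne).imp (fun h => lt_of_le_of_ne h.1 h.2)

lemma pvBy_getD (sd : List (Int × String)) (sc : String) :
    (pvBy sd).getD sc [] = pvF sc (pvIts sd) := by
  have h1 : pvBy sd = List.foldl (fun bs (q : String × Int) => bs.modify q.1 [] (fun l => l ++ [q.2]))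
      PySem.Dict.empty ((pvIts sd).map Prod.swap) := by
    rw [List.foldl_map]
    rfl
  rw [h1, PySem.Dict.getD_foldl_modify_append]
  simp [pvF, List.filter_map, List.map_map, Function.comp_def]

lemma pvBy_nodup (sd : List (Int × String)) : (pvBy sd).keys.Nodup := by
  apply PySem.Dict.nodup_keys_foldl_modify_key (pvIts sd) (fun p => p.2) []
    (fun _ p => fun l => l ++ [p.1])
  rw [PySem.Dict.keys_empty]; exact List.nodup_nil

lemma pvBy_mem_keys (sd : List (Int × String)) (sc : String) :
    sc ∈ (pvBy sd).keys ↔ sc ∈ (pvIts sd).map (fun p => p.2) := by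
  have h := PySem.Dict.keys_foldl_modify_key (pvIts sd) (fun p => p.2) []
    (fun _ p => fun l => l ++ [p.1]) PySem.Dict.empty
  rw [show pvBy sd = List.foldl
      (fun d x => d.modify x.2 [] ((fun _ p => fun l => l ++ [p.1]) d x)) PySem.Dict.empty (pvIts sd)
      from rfl, h, PySem.Dict.keys_empty]
  exact (PySem.Set.mem_update [] _ sc).trans (by simp)

lemma pvBy_items (sd : List (Int × String)) :
    (pvBy sd).items = (pvBy sd).keys.map (fun sc => (sc, pvF sc (pvIts sd))) := by
  rw [pvItems_eq_keys_map (pvBy sd) [] (pvBy_nodup sd)]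
  apply List.map_congr_left
  intro sc _
  rw [pvBy_getD]

lemma pvMem_values (sd : List (Int × String)) (sc : String) :
    sc ∈ (pvIts sd).map (fun p => p.2) ↔ sc ∈ (pvD sd).values := by
  exact ((PySem.List.sorted_perm (pvD sd).items (fun p => p.1) false).map (fun p => p.2)).mem_iff

lemma pvF_nonempty (sd : List (Int × String)) (sc : String)
    (h : sc ∈ (pvIts sd).map (fun p => p.2)) : pvF sc (pvIts sd) ≠ [] := by
  rcases List.mem_map.mp h with ⟨p, hp, rfl⟩
  have : p.1 ∈ pvF p.2 (pvIts sd) := by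
    simp only [pvF, List.mem_map, List.mem_filter]
    exact ⟨p, ⟨hp, by simp⟩, rfl⟩
  exact List.ne_nil_of_mem this

lemma pvF_pw (sd : List (Int × String)) (sc : String) :
    (pvF sc (pvIts sd)).Pairwise (fun a b => a ≤ b) := by
  have := (pvIts_pw sd).filter (fun p => p.2 == sc)
  exact List.pairwise_map.mpr (this.imp (fun h => le_of_lt h))

lemma pvRB_items (sd : List (Int × String)) :
    (pvRB sd).items = (pvBy sd).keys.map
      (fun sc => ((pvIds sd).getD sc 0, pvAranges (pvF sc (pvIts sd)))) := by
  have hcongr : pvRB sd = List.foldl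
      (fun rd (p : String × List Int) => rd.insert ((pvIds sd).getD p.1 0) (pvAranges p.2))
      PySem.Dict.empty (pvBy sd).items := by
    apply PySem.List.foldl_congr_mem
    intro acc p hp
    rw [pvBy_items sd] at hp
    rcases List.mem_map.mp hp with ⟨sc, hsc, rfl⟩
    have hne : pvF sc (pvIts sd) ≠ [] :=
      pvF_nonempty sd sc ((pvBy_mem_keys sd sc).mp hsc)
    have hsorted : PySem.List.sorted (pvF sc (pvIts sd)) (fun c => c) = pvF sc (pvIts sd) :=
      PySem.List.sorted_eq_self_of_pairwise _ _ (pvF_pw sd sc)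
    cases hF : pvF sc (pvIts sd) with
    | nil => exact absurd hF hne
    | cons c t =>
      rw [hF] at hsorted
      rw [hsorted]
      rfl
  rw [hcongr, pvBy_items sd, List.foldl_map]
  have := PySem.Dict.items_foldl_insert_fresh (pvBy sd).keys
    (fun sc => (pvIds sd).getD sc 0) (fun sc => pvAranges (pvF sc (pvIts sd))) PySem.Dict.empty
    (fun a _ => PySem.Dict.contains_empty _) ?_
  · rw [this]; rfl
  · apply (pvBy_nodup sd).map_on
    intro a ha b hb hab
    by_contra hne
    have hmem : ∀ x, x ∈ (pvBy sd).keys → x ∈ (pvD sd).values := fun x hx =>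
      (pvMem_values sd x).mp ((pvBy_mem_keys sd x).mp hx)
    exact pvScriptIds_inj (pvD sd).values (hmem a ha) (hmem b hb) hne hab

lemma pvFlat_eq (sd : List (Int × String)) :
    pvFlat sd = ((pvBy sd).keys.flatMap (fun sc => pvG sc (pvRuns (pvIts sd)))).map (pvSidMap sd) := by
  unfold pvFlat
  rw [PySem.List.foldl_append_eq_flatMap, List.nil_append, pvRB_items sd, List.flatMap_map]
  rw [List.map_flatMap]
  apply List.flatMap_congr
  intro sc _
  rw [pvCrux (pvIts sd) (pvIts_pw sd) sc]
  rw [List.map_map]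
  rfl

lemma pvFlat_perm (sd : List (Int × String)) :
    (pvFlat sd).Perm ((pvRuns (pvIts sd)).map (pvSidMap sd)) := by
  rw [pvFlat_eq]
  apply List.Perm.map
  exact pvPerm_flatMap_filter (fun r => r.2.2) (pvBy sd).keys (pvRuns (pvIts sd))
    (pvBy_nodup sd)
    (fun r hr => by
      rcases pvRuns_scripts (pvIts sd) r hr with ⟨x, hx, h⟩
      show r.2.2 ∈ (pvBy sd).keys
      rw [h]
      exact (pvBy_mem_keys sd x.2).mpr (List.mem_map.mpr ⟨x, hx, rfl⟩))

lemma pvMain (sd : List (Int × String)) :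
    build_script_ranges sd = build_script_ranges_alt sd := by
  rw [pvA_unfold, pvB_unfold]
  have hpwB : ((pvRuns (pvIts sd)).map (pvSidMap sd)).Pairwise (fun a b => a.1 < b.1) :=
    List.pairwise_map.mpr (pvRuns_pw (pvIts sd) (pvIts_pw sd))
  rw [PySem.List.sorted_eq_of_perm_of_pairwise_lt (pvFlat sd)
    ((pvRuns (pvIts sd)).map (pvSidMap sd)) (fun t => t.1) (pvFlat_perm sd).symm hpwB]

-- ===== VERDICT (by name: the statement is the Claim_ definition above) =====
theorem build_script_ranges_spec : Claim_equal_build_script_ranges := by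
  intro sd _
  exact pvMain sd
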